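-- pv_equiv track=rewrite | github.com/victe19/chatbot-dev | intents.py | reject
-- ===== SOURCE A (Python) =====
-- def preprocess(query: str) -> list:
--     """
--     First of all the function:
--         1. remove marks
--         2. remove uppercases
--         3. separate each word to build a list
--
--     Args:
--         query (str): query to preprocess
--
--     Returns:
--         list: list of words splited without puntuation marks
--     """
--
--     query=query.replace(',', '').replace('.', '').lower()
--     word_list = query.split()
--
--     return word_list
--
-- def reject(query:str) -> float:
--     """_summary_
--
--     Args:
--         query (str): query without processing
--
--     Returns:
--         confidence (float): probability that this query belongs to the intent reject
--     """
--     query = preprocess(query)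
--     word_list = ['no', 'negatiu', "noo"]
--
--     if any(word in query for word in word_list):
--         return  90
--
--     word_list = ["tampoc"]
--     if any(word in query for word in word_list):
--         return 75
--
--     return 0
-- ===== SOURCE B (Python) =====
-- def preprocess(query: str) -> list:
--     query = query.replace(',', '').replace('.', '').lower()
--     word_list = query.split()
--     return word_list
--
--
-- SCORES = {'no': 90, 'negatiu': 90, 'noo': 90, 'tampoc': 75}
--
--
-- def reject(query: str) -> float:
--     best = 0
--     for word in preprocess(query):
--         s = SCORES.get(word, 0)
--         if s > best:
--             best = s
--     return best
-- ===== Notes on version B (the rewrite author's own statement) =====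
-- stated objective: simpler
-- what changed: Replaces the two ordered any-membership scans over fixed trigger lists with a single pass over the words keeping a running maximum of per-word scores from a score table.
import Mathlib
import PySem

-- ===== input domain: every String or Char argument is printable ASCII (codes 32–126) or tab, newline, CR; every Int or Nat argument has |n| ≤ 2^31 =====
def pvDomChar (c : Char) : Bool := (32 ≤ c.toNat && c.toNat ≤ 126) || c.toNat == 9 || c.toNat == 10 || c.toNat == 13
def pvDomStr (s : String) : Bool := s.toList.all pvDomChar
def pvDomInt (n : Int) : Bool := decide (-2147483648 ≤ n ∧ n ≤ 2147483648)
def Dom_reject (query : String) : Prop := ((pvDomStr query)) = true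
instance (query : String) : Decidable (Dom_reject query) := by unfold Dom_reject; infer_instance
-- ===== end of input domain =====

-- B replaces A's two ordered any-membership scans with a single max-of-scores pass over the words (objective: simpler).

-- ===== PORT A =====
def preprocessA (query : String) : List String :=
  PySem.Str.split₀ (PySem.Str.lower (PySem.Str.replace (PySem.Str.replace query "," "") "." ""))

def reject (query : String) : Int :=
  let q := preprocessA query
  if (["no", "negatiu", "noo"] : List String).any (fun word => q.contains word) then 90
  else if (["tampoc"] : List String).any (fun word => q.contains word) then 75
  else 0

-- ===== PORT B =====
def preprocessB (query : String) : List String :=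
  PySem.Str.split₀ (PySem.Str.lower (PySem.Str.replace (PySem.Str.replace query "," "") "." ""))

def scoresB : PySem.Dict String Int :=
  PySem.Dict.ofList [("no", 90), ("negatiu", 90), ("noo", 90), ("tampoc", 75)]

def reject_alt (query : String) : Int :=
  (preprocessB query).foldl
    (fun best word =>
      let s := scoresB.getD word 0
      if s > best then s else best) 0

-- ===== PRECONDITION & SPEC =====
def Spec_reject (query : String) (out : Int) : Prop := out = reject_alt query
instance (query : String) (out : Int) : Decidable (Spec_reject query out) := by unfold Spec_reject; infer_instance

-- ===== CLAIM (what is proved, stated in full; the proofs are below) =====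
def Claim_equal_reject : Prop := ∀ (query : String), Dom_reject query → Spec_reject query (reject query)

-- ===== LEMMAS AND PROOFS =====

-- A's value on a word list, written as the same if-chain A uses.
def avalWords (q : List String) : Int :=
  if (["no", "negatiu", "noo"] : List String).any (fun word => q.contains word) then 90
  else if (["tampoc"] : List String).any (fun word => q.contains word) then 75
  else 0

lemma scoresB_items :
    scoresB.items = [("no", (90 : Int)), ("negatiu", 90), ("noo", 90), ("tampoc", 75)] := by
  decide

lemma score_eq (w : String) :
    scoresB.getD w 0 =
      if w = "no" then 90 else if w = "negatiu" then 90 else if w = "noo" then 90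
      else if w = "tampoc" then 75 else 0 := by
  simp only [PySem.Dict.getD, PySem.Dict.get?, scoresB_items]
  by_cases h1 : w = "no"
  · subst h1; decide
  by_cases h2 : w = "negatiu"
  · subst h2; decide
  by_cases h3 : w = "noo"
  · subst h3; decide
  by_cases h4 : w = "tampoc"
  · subst h4; decide
  have f : ∀ a : String, ¬ w = a → (a == w) = false :=
    fun a h => beq_eq_false_iff_ne.mpr (fun e => h e.symm)
  simp [List.find?, f _ h1, f _ h2, f _ h3, f _ h4, h1, h2, h3, h4]

lemma avalWords_cons (w : String) (q : List String) :
    avalWords (w :: q) = max (scoresB.getD w 0) (avalWords q) := by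
  rw [score_eq]
  simp only [avalWords, List.any_cons, List.any_nil, List.contains_cons, Bool.or_false,
    Bool.or_eq_true, beq_iff_eq]
  by_cases h1 : w = "no" <;> by_cases h2 : w = "negatiu" <;> by_cases h3 : w = "noo" <;>
    by_cases h4 : w = "tampoc" <;>
    simp_all [eq_comm] <;> split_ifs <;> simp_all

lemma avalWords_nonneg (q : List String) : 0 ≤ avalWords q := by
  unfold avalWords; split_ifs <;> omega

lemma fold_eq (q : List String) : ∀ b : Int, 0 ≤ b →
    q.foldl (fun best word =>
      let s := scoresB.getD word 0
      if s > best then s else best) b = max b (avalWords q) := by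
  induction q with
  | nil =>
    intro b hb
    simpa [avalWords] using (max_eq_left hb).symm
  | cons w q ih =>
    intro b hb
    have hs : (if scoresB.getD w 0 > b then scoresB.getD w 0 else b) = max b (scoresB.getD w 0) := by
      rcases max_cases b (scoresB.getD w 0) with ⟨h, h'⟩ | ⟨h, h'⟩ <;> rw [h] <;> split_ifs <;> omega
    simp only [List.foldl]
    rw [hs, ih _ (le_trans hb (le_max_left _ _)), avalWords_cons]
    rcases max_cases (scoresB.getD w 0) (avalWords q) with ⟨h, h'⟩ | ⟨h, h'⟩ <;> rw [h] <;> omega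

-- ===== VERDICT (by name: the statement is the Claim_ definition above) =====
theorem reject_spec : Claim_equal_reject := by
  intro query _
  unfold Spec_reject reject reject_alt
  have hpre : preprocessB query = preprocessA query := rfl
  rw [hpre, fold_eq (preprocessA query) 0 le_rfl]
  have := avalWords_nonneg (preprocessA query)
  simp only [max_eq_right this]
  rfl
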